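-- pv_equiv track=rewrite | github.com/eliottcassidy2000/math | 04-computation/phase_transition_direct.py | build_conflict_graph
-- ===== SOURCE A (Python) =====
-- def build_conflict_graph(cycle_sets):
--     """Build adjacency list for Omega(T): edge iff shared vertex."""
--     n = len(cycle_sets)
--     adj = [[] for _ in range(n)]
--     for i in range(n):
--         for j in range(i + 1, n):
--             if cycle_sets[i] & cycle_sets[j]:
--                 adj[i].append(j)
--                 adj[j].append(i)
--     return adj
-- ===== SOURCE B (Python) =====
-- def build_conflict_graph(cycle_sets):
--     """Inverted index vertex -> sets containing it; neighbors = union of occurrence lists."""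
--     index = {}
--     for i in range(len(cycle_sets)):
--         for v in cycle_sets[i]:
--             index.setdefault(v, []).append(i)
--     adj = []
--     for i in range(len(cycle_sets)):
--         nb = set()
--         for v in cycle_sets[i]:
--             nb.update(index[v])
--         nb.discard(i)
--         adj.append(sorted(nb))
--     return adj
-- ===== Notes on version B (the rewrite author's own statement) =====
-- stated objective: faster
-- what changed: Replaced the O(n^2) pairwise set-intersection loop by an inverted index vertex->list-of-set-indices; each set's neighbor list is the sorted union of the occurrence lists of its vertices, so no pair of disjoint sets is ever compared.
import Mathlib
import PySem

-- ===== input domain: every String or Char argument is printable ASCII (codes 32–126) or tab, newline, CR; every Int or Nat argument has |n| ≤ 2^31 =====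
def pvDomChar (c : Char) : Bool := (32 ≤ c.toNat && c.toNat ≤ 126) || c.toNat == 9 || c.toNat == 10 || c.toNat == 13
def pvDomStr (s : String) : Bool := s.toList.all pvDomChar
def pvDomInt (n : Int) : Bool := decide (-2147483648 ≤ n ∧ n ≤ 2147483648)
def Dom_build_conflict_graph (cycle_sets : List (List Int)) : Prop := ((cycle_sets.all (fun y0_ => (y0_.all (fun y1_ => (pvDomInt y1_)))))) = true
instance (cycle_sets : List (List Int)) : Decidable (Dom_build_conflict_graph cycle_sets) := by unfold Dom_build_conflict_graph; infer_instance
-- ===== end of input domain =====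

-- B replaces A's O(n^2) pairwise set-intersection scan by an inverted index vertex -> set-indices;
-- each neighbor row is the sorted union of the occurrence lists of the set's vertices (objective: faster).

-- ===== PORT A =====
def build_conflict_graph (cycle_sets : List (List Int)) : List (List Int) :=
  let n := cycle_sets.length
  let adj : List (List Int) := (List.range n).map (fun _ => [])
  (List.range n).foldl (fun adj i =>
    (List.range' (i + 1) (n - (i + 1))).foldl (fun adj j =>
      if (cycle_sets.getD i []).any (fun v => (cycle_sets.getD j []).contains v) then
        (adj.modify i (fun row => row ++ [(j : Int)])).modify j (fun row => row ++ [(i : Int)])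
      else adj) adj) adj

-- ===== PORT B =====
def build_conflict_graph_alt (cycle_sets : List (List Int)) : List (List Int) :=
  let n := cycle_sets.length
  let index : PySem.Dict Int (List Int) :=
    (List.range n).foldl (fun d i =>
      (cycle_sets.getD i []).foldl (fun d v => d.modify v [] (fun occ => occ ++ [(i : Int)])) d)
      PySem.Dict.empty
  (List.range n).foldl (fun adj i =>
    let nb : PySem.Set Int :=
      (cycle_sets.getD i []).foldl (fun nb v => PySem.Set.update nb (index.getD v []))
        PySem.Set.empty
    adj ++ [PySem.List.sorted (nb.discard (i : Int)) (fun x => x)]) []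

-- ===== PRECONDITION & SPEC =====
def Spec_build_conflict_graph (cycle_sets : List (List Int)) (out : List (List Int)) : Prop := out = build_conflict_graph_alt cycle_sets
instance (cycle_sets : List (List Int)) (out : List (List Int)) : Decidable (Spec_build_conflict_graph cycle_sets out) := by unfold Spec_build_conflict_graph; infer_instance

-- ===== CLAIM (what is proved, stated in full; the proofs are below) =====
def Claim_equal_build_conflict_graph : Prop := ∀ (cycle_sets : List (List Int)), Dom_build_conflict_graph cycle_sets → Spec_build_conflict_graph cycle_sets (build_conflict_graph cycle_sets)

-- ===== LEMMAS AND PROOFS =====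
-- Both ports are shown equal to the canonical adjacency list: row i is the ascending list of
-- the indices j ≠ i whose set shares a vertex with set i.

def pvShares (cs : List (List Int)) (a b : Nat) : Bool :=
  (cs.getD a []).any (fun v => (cs.getD b []).contains v)

def pvStepA (cs : List (List Int)) (i : Nat) (adj : List (List Int)) (j : Nat) : List (List Int) :=
  if pvShares cs i j then (adj.modify i (fun row => row ++ [(j : Int)])).modify j (fun row => row ++ [(i : Int)]) else adj

lemma pvShares_symm (cs : List (List Int)) (a b : Nat) : pvShares cs a b = pvShares cs b a := by
  simp only [pvShares]; rw [Bool.eq_iff_iff]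
  simp only [List.any_eq_true, List.contains_iff_mem]
  exact ⟨fun ⟨v,h1,h2⟩ => ⟨v,h2,h1⟩, fun ⟨v,h1,h2⟩ => ⟨v,h2,h1⟩⟩

lemma pvGetD_modify (l : List (List Int)) (i k : Nat) (f : List Int → List Int) :
    (l.modify i f).getD k [] = if k = i ∧ k < l.length then f (l.getD k []) else l.getD k [] := by
  simp only [List.getD, List.getElem?_modify]
  by_cases h : k < l.length
  · rw [List.getElem?_eq_getElem h]
    by_cases hik : k = i
    · subst hik; simp [h]
    · simp only [hik, false_and, if_false, Option.map_eq_map, Option.map_some, Option.getD_some]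
      rw [if_neg (fun h' => hik h'.symm)]
  · rw [List.getElem?_eq_none (by omega)]
    simp [h]

lemma pvStepA_length (cs : List (List Int)) (i : Nat) (adj : List (List Int)) (j : Nat) :
    (pvStepA cs i adj j).length = adj.length := by
  unfold pvStepA; split_ifs <;> simp [List.length_modify]

lemma pvInnerA_length (cs : List (List Int)) (i : Nat) (js : List Nat) :
    ∀ (adj : List (List Int)), (js.foldl (pvStepA cs i) adj).length = adj.length := by
  induction js with
  | nil => intro adj; rfl
  | cons j t ih => intro adj; rw [List.foldl_cons, ih, pvStepA_length]

lemma pvStepA_getD (cs : List (List Int)) (i j k : Nat) (adj : List (List Int))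
    (hij : i < j) (hi : i < adj.length) (hj : j < adj.length) :
    (pvStepA cs i adj j).getD k [] =
      if k = i then adj.getD k [] ++ (if pvShares cs i j then [(j : Int)] else [])
      else if k = j then adj.getD k [] ++ (if pvShares cs i j then [(i : Int)] else [])
      else adj.getD k [] := by
  unfold pvStepA
  by_cases hs : pvShares cs i j = true
  · simp only [hs, if_true]
    rw [pvGetD_modify, pvGetD_modify]
    simp only [List.length_modify]
    by_cases hki : k = i
    · subst hki; rw [if_neg (by omega), if_pos ⟨rfl, hi⟩, if_pos rfl]
    · by_cases hkj : k = j
      · subst hkj; rw [if_pos ⟨rfl, hj⟩, if_neg (by omega), if_neg hki, if_pos rfl]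
      · rw [if_neg (by tauto), if_neg (by tauto), if_neg hki, if_neg hkj]
  · simp only [hs, if_false, Bool.false_eq_true]
    split_ifs <;> simp

lemma pvInnerA_foldl (cs : List (List Int)) (i : Nat) :
    ∀ (js : List Nat) (adj : List (List Int)) (k : Nat),
      (∀ j ∈ js, i < j) → js.Pairwise (· < ·) → i < adj.length → (∀ j ∈ js, j < adj.length) →
      (js.foldl (pvStepA cs i) adj).getD k [] =
        if k = i then adj.getD k [] ++ (js.filter (fun j => pvShares cs i j)).map (fun j => Int.ofNat j)
        else if k ∈ js ∧ pvShares cs i k = true then adj.getD k [] ++ [(i : Int)]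
        else adj.getD k [] := by
  intro js
  induction js with
  | nil => intro adj k _ _ _ _; simp
  | cons j t ih =>
    intro adj k hgt hp hi hlen
    rw [List.foldl_cons]
    have hij : i < j := hgt j (by simp)
    have hj : j < adj.length := hlen j (by simp)
    have hlen' : (pvStepA cs i adj j).length = adj.length := pvStepA_length ..
    have hjt : ∀ x ∈ t, j < x := fun x hx => (List.pairwise_cons.mp hp).1 x hx
    rw [ih (pvStepA cs i adj j) k (fun x hx => hgt x (by simp [hx])) (List.pairwise_cons.mp hp).2
      (by omega) (fun x hx => by rw [hlen']; exact hlen x (by simp [hx]))]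
    by_cases hki : k = i
    · subst hki
      rw [if_pos rfl, if_pos rfl, pvStepA_getD cs k j k adj hij hi hj, if_pos rfl]
      by_cases hs : pvShares cs k j = true <;>
        simp [hs]
    · rw [if_neg hki, if_neg hki]
      by_cases hkj : k = j
      · subst hkj
        have hkt : k ∉ t := fun h => absurd (hjt k h) (by omega)
        rw [if_neg (by tauto), pvStepA_getD cs i k k adj hij hi hj, if_neg hki, if_pos rfl]
        by_cases hs : pvShares cs i k = true <;> simp [hs]
      · rw [pvStepA_getD cs i j _ adj hij hi hj, if_neg hki, if_neg hkj]
        have : (k ∈ j :: t) ↔ (k ∈ t) := by simp [hkj]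
        by_cases hm : k ∈ t ∧ pvShares cs i k = true
        · rw [if_pos hm, if_pos (by tauto)]
        · rw [if_neg hm, if_neg (by tauto)]

def pvOuterA (cs : List (List Int)) (adj : List (List Int)) (i : Nat) : List (List Int) :=
  (List.range' (i + 1) (cs.length - (i + 1))).foldl (pvStepA cs i) adj

lemma pvOuterA_invariant (cs : List (List Int)) :
    ∀ (m : Nat), m ≤ cs.length →
      ((List.range m).foldl (pvOuterA cs) ((List.range cs.length).map (fun _ => []))).length = cs.length ∧
      ∀ k, k < cs.length →
        ((List.range m).foldl (pvOuterA cs) ((List.range cs.length).map (fun _ => []))).getD k [] =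
          ((List.range (min m k)).filter (fun j => pvShares cs j k)).map (fun j => Int.ofNat j) ++
          (if k < m then ((List.range' (k + 1) (cs.length - (k + 1))).filter (fun j => pvShares cs k j)).map (fun j => Int.ofNat j) else []) := by
  intro m
  induction m with
  | zero =>
    intro _
    refine ⟨by simp, fun k hk => ?_⟩
    simp
  | succ m ih =>
    intro hm1
    obtain ⟨ihlen, ihget⟩ := ih (by omega)
    rw [List.range_succ, List.foldl_append, List.foldl_cons, List.foldl_nil]
    refine ⟨by rw [pvOuterA, pvInnerA_length, ihlen], fun k hk => ?_⟩
    rw [pvOuterA, pvInnerA_foldl cs m _ _ k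
      (fun j hj => by have := List.mem_range'_1.mp hj; omega)
      (List.pairwise_lt_range' 1)
      (by rw [ihlen]; omega)
      (fun j hj => by have := List.mem_range'_1.mp hj; rw [ihlen]; omega)]
    by_cases hkm : k = m
    · rw [if_pos hkm, ihget k hk, hkm]
      simp
    · rw [if_neg hkm]
      by_cases hlt : k < m
      · have hnotmem : ¬ (k ∈ List.range' (m + 1) (cs.length - (m + 1)) ∧ pvShares cs m k = true) := by
          rintro ⟨hmem, -⟩; have := List.mem_range'_1.mp hmem; omega
        rw [if_neg hnotmem, ihget k hk]
        have h1 : min m k = k := by omega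
        have h2 : min (m + 1) k = k := by omega
        rw [h1, h2, if_pos hlt, if_pos (by omega : k < m + 1)]
      · -- m < k
        have hmk : m < k := by omega
        have hmem : k ∈ List.range' (m + 1) (cs.length - (m + 1)) := by
          rw [List.mem_range'_1]; omega
        have h1 : min m k = m := by omega
        have h2 : min (m + 1) k = m + 1 := by omega
        rw [ihget k hk, h1, h2, if_neg (by omega : ¬ k < m), if_neg (by omega : ¬ k < m + 1),
          List.range_succ]
        by_cases hs : pvShares cs m k = true
        · rw [if_pos ⟨hmem, hs⟩]
          simp [List.filter_append, hs]
        · rw [if_neg (by tauto)]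
          simp [List.filter_append, hs]

def pvNbrs (cs : List (List Int)) (i : Nat) : List Int :=
  ((List.range cs.length).filter (fun j => decide (j ≠ i) && pvShares cs j i)).map (fun j => Int.ofNat j)

lemma pvRange_split (n k : Nat) (hk : k < n) :
    List.range n = (List.range k ++ [k]) ++ List.range' (k + 1) (n - (k + 1)) := by
  have h := List.range'_append (s := 0) (m := k + 1) (n := n - (k + 1)) (step := 1)
  rw [Nat.one_mul, Nat.zero_add, show k + 1 + (n - (k + 1)) = n by omega] at h
  calc List.range n = List.range' 0 n := List.range_eq_range'
    _ = List.range' 0 (k + 1) ++ List.range' (k + 1) (n - (k + 1)) := h.symm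
    _ = (List.range k ++ [k]) ++ List.range' (k + 1) (n - (k + 1)) := by
        rw [← List.range_eq_range', List.range_succ]

lemma pvNbrs_split (cs : List (List Int)) (k : Nat) (hk : k < cs.length) :
    pvNbrs cs k =
      ((List.range k).filter (fun j => pvShares cs j k)).map (fun j => Int.ofNat j) ++
      ((List.range' (k + 1) (cs.length - (k + 1))).filter (fun j => pvShares cs k j)).map (fun j => Int.ofNat j) := by
  unfold pvNbrs
  rw [pvRange_split cs.length k hk, List.filter_append, List.filter_append, List.map_append, List.map_append]
  have h1 : (List.range k).filter (fun j => decide (j ≠ k) && pvShares cs j k) =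
      (List.range k).filter (fun j => pvShares cs j k) := by
    apply List.filter_congr
    intro x hx
    have : x < k := List.mem_range.mp hx
    simp [show x ≠ k by omega]
  have h2 : ([k]).filter (fun j => decide (j ≠ k) && pvShares cs j k) = [] := by simp
  have h3 : (List.range' (k + 1) (cs.length - (k + 1))).filter (fun j => decide (j ≠ k) && pvShares cs j k) =
      (List.range' (k + 1) (cs.length - (k + 1))).filter (fun j => pvShares cs k j) := by
    apply List.filter_congr
    intro x hx
    have := List.mem_range'_1.mp hx
    simp [show x ≠ k by omega, pvShares_symm cs x k]
  rw [h1, h2, h3]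
  simp

lemma pvA_eq_canonical (cs : List (List Int)) :
    build_conflict_graph cs = (List.range cs.length).map (pvNbrs cs) := by
  have hA : build_conflict_graph cs =
      (List.range cs.length).foldl (pvOuterA cs) ((List.range cs.length).map (fun _ => [])) := rfl
  obtain ⟨hlen, hget⟩ := pvOuterA_invariant cs cs.length le_rfl
  rw [hA]
  apply List.ext_getElem
  · rw [hlen]; simp
  · intro k h1 h2
    rw [← List.getD_eq_getElem _ [] h1, hget k (by rwa [hlen] at h1)]
    have hk : k < cs.length := by rwa [hlen] at h1
    rw [List.getElem_map, List.getElem_range, pvNbrs_split cs k hk]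
    rw [min_eq_right (by omega), if_pos hk]

def pvIndex (cs : List (List Int)) : PySem.Dict Int (List Int) :=
  (List.range cs.length).foldl (fun d i =>
    (cs.getD i []).foldl (fun d v => d.modify v [] (fun occ => occ ++ [(i : Int)])) d)
    PySem.Dict.empty

lemma pvIndex_flat (cs : List (List Int)) :
    pvIndex cs = ((List.range cs.length).flatMap (fun i => (cs.getD i []).map (fun w => (w, (i : Int))))).foldl
      (fun d p => d.modify p.1 [] (fun occ => occ ++ [p.2])) PySem.Dict.empty := by
  unfold pvIndex
  rw [List.foldl_flatMap]
  simp only [List.foldl_map]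

lemma pvMem_index (cs : List (List Int)) (v : Int) (y : Int) :
    y ∈ (pvIndex cs).getD v [] ↔ ∃ j, j < cs.length ∧ v ∈ cs.getD j [] ∧ y = (j : Int) := by
  rw [pvIndex_flat, PySem.Dict.getD_foldl_modify_append]
  simp only [PySem.Dict.getD_empty, List.nil_append, List.mem_map, List.mem_filter,
    List.mem_flatMap, List.mem_range, beq_iff_eq]
  constructor
  · rintro ⟨p, ⟨⟨j, hj, ⟨w, hw, rfl⟩⟩, hv⟩, rfl⟩
    exact ⟨j, hj, by simpa using hv ▸ hw, rfl⟩
  · rintro ⟨j, hj, hv, rfl⟩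
    exact ⟨(v, (j : Int)), ⟨⟨j, hj, ⟨v, hv, rfl⟩⟩, rfl⟩, rfl⟩

lemma pvMem_nb (cs : List (List Int)) (s : List Int) :
    ∀ (nb : PySem.Set Int) (y : Int),
      y ∈ s.foldl (fun nb v => PySem.Set.update nb ((pvIndex cs).getD v [])) nb ↔
        y ∈ nb ∨ ∃ v ∈ s, y ∈ (pvIndex cs).getD v [] := by
  induction s with
  | nil => intro nb y; simp
  | cons v t ih =>
    intro nb y
    rw [List.foldl_cons, ih, PySem.Set.mem_update]
    simp only [List.mem_cons]
    constructor
    · rintro (⟨h | h⟩ | ⟨w, hw, h⟩)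
      · exact Or.inl h
      · exact Or.inr ⟨v, Or.inl rfl, h⟩
      · exact Or.inr ⟨w, Or.inr hw, h⟩
    · rintro (h | ⟨w, (rfl | hw), h⟩)
      · exact Or.inl (Or.inl h)
      · exact Or.inl (Or.inr h)
      · exact Or.inr ⟨w, hw, h⟩

lemma pvNodup_nb (cs : List (List Int)) (s : List Int) :
    ∀ (nb : PySem.Set Int), nb.Nodup →
      (s.foldl (fun nb v => PySem.Set.update nb ((pvIndex cs).getD v [])) nb).Nodup := by
  induction s with
  | nil => intro nb h; exact h
  | cons v t ih => intro nb h; exact ih _ (PySem.Set.nodup_update _ _ h)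

lemma pvNbrs_pairwise (cs : List (List Int)) (i : Nat) : (pvNbrs cs i).Pairwise (· < ·) := by
  unfold pvNbrs
  refine List.Pairwise.map _ (fun a b h => ?_) (List.pairwise_lt_range.filter _)
  exact Int.ofNat_lt.mpr h

lemma pvRow_eq (cs : List (List Int)) (i : Nat) :
    PySem.List.sorted
      (PySem.Set.discard
        ((cs.getD i []).foldl (fun nb v => PySem.Set.update nb ((pvIndex cs).getD v []))
          PySem.Set.empty) (i : Int))
      (fun x => x) = pvNbrs cs i := by
  apply PySem.List.sorted_eq_of_perm_of_pairwise_lt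
  · -- perm
    rw [List.perm_ext_iff_of_nodup]
    · intro y
      rw [PySem.Set.mem_discard, pvMem_nb]
      unfold pvNbrs
      simp only [List.mem_map, List.mem_filter, List.mem_range, Bool.and_eq_true, decide_eq_true_eq]
      constructor
      · rintro ⟨j, ⟨hj, hji, hsh⟩, rfl⟩
        have : pvShares cs j i = true := hsh
        simp only [pvShares, List.any_eq_true, List.contains_iff_mem] at this
        obtain ⟨v, hv1, hv2⟩ := this
        refine ⟨Or.inr ⟨v, hv2, (pvMem_index cs v _).mpr ⟨j, hj, hv1, rfl⟩⟩, by
          simp only [Int.ofNat_eq_natCast, ne_eq, Nat.cast_inj]; exact_mod_cast fun h => hji (by exact_mod_cast h)⟩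
      · rintro ⟨(h | ⟨v, hv, hmem⟩), hne⟩
        · exact absurd h (List.not_mem_nil)
        · obtain ⟨j, hj, hvj, rfl⟩ := (pvMem_index cs v _).mp hmem
          refine ⟨j, ⟨hj, fun h => hne (by rw [h]), ?_⟩, rfl⟩
          simp only [pvShares, List.any_eq_true, List.contains_iff_mem]
          exact ⟨v, hvj, hv⟩
    · -- nodup of pvNbrs
      exact (pvNbrs_pairwise cs i).imp (fun h => ne_of_lt h)
    · exact PySem.Set.nodup_discard _ _ (pvNodup_nb cs _ _ List.nodup_nil)
  · -- pairwise <
    exact pvNbrs_pairwise cs i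

lemma pvB_eq_canonical (cs : List (List Int)) :
    build_conflict_graph_alt cs = (List.range cs.length).map (pvNbrs cs) := by
  have hB : build_conflict_graph_alt cs = (List.range cs.length).foldl (fun adj i => adj ++
      [PySem.List.sorted (PySem.Set.discard ((cs.getD i []).foldl
        (fun nb v => PySem.Set.update nb ((pvIndex cs).getD v [])) PySem.Set.empty) (i : Int))
        (fun x => x)]) [] := rfl
  rw [hB, PySem.List.foldl_append_singleton_eq_map]
  rw [List.nil_append]
  exact List.map_congr_left (fun i _ => pvRow_eq cs i)

-- ===== VERDICT (by name: the statement is the Claim_ definition above) =====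
theorem build_conflict_graph_spec : Claim_equal_build_conflict_graph := by
  intro cs _
  show build_conflict_graph cs = build_conflict_graph_alt cs
  rw [pvA_eq_canonical, pvB_eq_canonical]
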